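-- pv_equiv track=rewrite | github.com/jfvitas/ProteoSphereV2 | scripts/export_training_set_eligibility_matrix_preview.py | _primary_class
-- ===== SOURCE A (Python) =====
-- from typing import Any
--
-- def _primary_class(task_statuses: dict[str, dict[str, Any]]) -> str:
--     ordered = (
--         "candidate_only_non_governing",
--         "blocked_pending_acquisition",
--         "eligible_for_task",
--         "library_only",
--         "audit_only",
--     )
--     present = {value["status"] for value in task_statuses.values()}
--     for status in ordered:
--         if status in present:
--             return status
--     return "audit_only"
-- ===== SOURCE B (Python) =====
-- from typing import Any
--
-- def _primary_class(task_statuses: dict[str, dict[str, Any]]) -> str: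
--     ordered = (
--         "candidate_only_non_governing",
--         "blocked_pending_acquisition",
--         "eligible_for_task",
--         "library_only",
--         "audit_only",
--     )
--     rank = {status: i for i, status in enumerate(ordered)}
--     best = len(ordered)
--     for value in task_statuses.values():
--         r = rank.get(value["status"], len(ordered))
--         if r < best:
--             best = r
--     return ordered[best] if best < len(ordered) else "audit_only"
-- ===== Notes on version B (the rewrite author's own statement) =====
-- stated objective: alternative
-- what changed: Replaces A's build-a-set-of-statuses-then-probe-the-fixed-order pass with a single rank-and-minimize fold: each status is mapped to its priority index via an enumerate-built rank dict (unknown statuses rank as infinity = len(ordered)) and the minimum rank seen selects the result.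
import Mathlib
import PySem

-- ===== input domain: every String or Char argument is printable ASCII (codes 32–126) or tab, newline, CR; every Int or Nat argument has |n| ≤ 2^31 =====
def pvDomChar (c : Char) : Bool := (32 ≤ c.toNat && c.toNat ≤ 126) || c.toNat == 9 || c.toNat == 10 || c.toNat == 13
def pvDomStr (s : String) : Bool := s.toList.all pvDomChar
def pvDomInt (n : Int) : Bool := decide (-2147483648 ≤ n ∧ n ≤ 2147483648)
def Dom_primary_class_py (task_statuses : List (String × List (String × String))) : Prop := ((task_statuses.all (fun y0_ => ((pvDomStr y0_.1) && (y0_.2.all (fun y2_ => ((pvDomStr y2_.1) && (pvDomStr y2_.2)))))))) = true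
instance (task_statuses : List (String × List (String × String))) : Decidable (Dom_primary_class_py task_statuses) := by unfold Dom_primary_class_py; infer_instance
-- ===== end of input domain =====

-- B replaces A's "build the set of present statuses, then probe the five statuses in priority
-- order" by a single rank-and-minimize fold over the values (same O(n) cost, different shape).

-- value["status"] (first match in the assoc list); Pre_ guarantees the key is present,
-- so the "" default is never reached on admitted inputs (Python raises KeyError there).
def pvStatus (d : List (String × String)) : String :=
  ((PySem.Dict.mk d).get? "status").getD ""

-- ===== PORT A =====
def pvOrdered : List String :=
  ["candidate_only_non_governing", "blocked_pending_acquisition",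
   "eligible_for_task", "library_only", "audit_only"]

-- the 'for status in ordered: if status in present: return status' loop
def pvProbe (present : PySem.Set String) : List String → String
  | [] => "audit_only"
  | s :: rest => if PySem.Set.contains present s then s else pvProbe present rest

def primary_class_py (task_statuses : List (String × List (String × String))) : String :=
  let present : PySem.Set String :=
    PySem.Set.ofList (task_statuses.map (fun kv => pvStatus kv.2))
  pvProbe present pvOrdered

-- ===== PORT B =====
-- rank = {status: i for i, status in enumerate(ordered)}
def pvRank : PySem.Dict String Int :=
  (PySem.List.enumerate pvOrdered).foldl (fun d p => d.insert p.2 p.1) PySem.Dict.empty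

def primary_class_py_alt (task_statuses : List (String × List (String × String))) : String :=
  let best : Int := task_statuses.foldl
    (fun best kv =>
      let r := pvRank.getD (pvStatus kv.2) (pvOrdered.length : Int)
      if r < best then r else best)
    (pvOrdered.length : Int)
  if best < (pvOrdered.length : Int) then (PySem.List.pyGet? pvOrdered best).getD "" else "audit_only"

-- ===== PRECONDITION & SPEC =====
-- Pre_ excludes inputs where some value dict lacks the "status" key: Python A raises KeyError there.
def Pre_primary_class_py (task_statuses : List (String × List (String × String))) : Prop :=
  ∀ kv ∈ task_statuses, (PySem.Dict.mk kv.2).contains "status" = true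
instance (task_statuses : List (String × List (String × String))) : Decidable (Pre_primary_class_py task_statuses) := by unfold Pre_primary_class_py; infer_instance

def pvWitness_primary_class_py : (List (String × List (String × String))) :=
  [("t1", [("status", "eligible_for_task")]), ("t2", [("status", "library_only")])]

def Spec_primary_class_py (task_statuses : List (String × List (String × String))) (out : String) : Prop := out = primary_class_py_alt task_statuses
instance (task_statuses : List (String × List (String × String))) (out : String) : Decidable (Spec_primary_class_py task_statuses out) := by unfold Spec_primary_class_py; infer_instance

-- ===== CLAIM (what is proved, stated in full; the proofs are below) =====
def Claim_equal_primary_class_py : Prop := ∀ (task_statuses : List (String × List (String × String))), Dom_primary_class_py task_statuses → Pre_primary_class_py task_statuses → Spec_primary_class_py task_statuses (primary_class_py task_statuses)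

-- ===== LEMMAS AND PROOFS =====

-- the rank lookup, evaluated
def pvRankF (s : String) : Int := pvRank.getD s (pvOrdered.length : Int)

theorem pvRankF_eval (s : String) :
    pvRankF s =
      if "candidate_only_non_governing" = s then 0
      else if "blocked_pending_acquisition" = s then 1
      else if "eligible_for_task" = s then 2
      else if "library_only" = s then 3
      else if "audit_only" = s then 4
      else 5 := by
  have h : pvRank = PySem.Dict.mk
      [("candidate_only_non_governing", 0), ("blocked_pending_acquisition", 1),
       ("eligible_for_task", 2), ("library_only", 3), ("audit_only", 4)] := by decide
  simp only [pvRankF, h, PySem.Dict.getD_eq_get?_getD, PySem.Dict.get?_mk_cons,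
    beq_iff_eq, pvOrdered, List.length]
  split_ifs <;> rfl

def pvFoldB (L : List String) (b : Int) : Int :=
  L.foldl (fun best s => if pvRankF s < best then pvRankF s else best) b

theorem pvFoldB_le (L : List String) (b : Int) : pvFoldB L b ≤ b := by
  induction L generalizing b with
  | nil => simp [pvFoldB]
  | cons s L ih =>
    simp only [pvFoldB, List.foldl_cons]
    split_ifs with h
    · exact le_of_lt (lt_of_le_of_lt (ih _) h)
    · exact ih b

theorem pvFoldB_mem_le (L : List String) (b : Int) (s : String) (hs : s ∈ L) :
    pvFoldB L b ≤ pvRankF s := by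
  induction L generalizing b with
  | nil => cases hs
  | cons t L ih =>
    simp only [pvFoldB, List.foldl_cons]
    rcases List.mem_cons.mp hs with rfl | hs'
    · split_ifs with h
      · exact pvFoldB_le L _
      · exact le_trans (pvFoldB_le L b) (not_lt.mp h)
    · split_ifs with h <;> exact ih _ hs'

theorem pvFoldB_lt (L : List String) (b : Int) (h : pvFoldB L b < b) :
    ∃ s ∈ L, pvRankF s = pvFoldB L b := by
  induction L generalizing b with
  | nil => simp [pvFoldB] at h
  | cons t L ih =>
    simp only [pvFoldB, List.foldl_cons] at h ⊢
    split_ifs at h ⊢ with ht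
    · by_cases h2 : pvFoldB L (pvRankF t) < pvRankF t
      · obtain ⟨s, hs, he⟩ := ih _ h2
        exact ⟨s, List.mem_cons_of_mem _ hs, he⟩
      · exact ⟨t, List.mem_cons_self, le_antisymm (not_lt.mp h2) (pvFoldB_le _ _)⟩
    · obtain ⟨s, hs, he⟩ := ih _ h
      exact ⟨s, List.mem_cons_of_mem _ hs, he⟩

theorem pvNotMem (L : List String) (t : String) (hlt : pvRankF t < pvFoldB L 5) : t ∉ L :=
  fun hm => absurd (pvFoldB_mem_le L 5 t hm) (not_le.mpr hlt)

theorem pvMain (L : List String) :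
    pvProbe (PySem.Set.ofList L) pvOrdered =
      (if pvFoldB L 5 < 5 then (PySem.List.pyGet? pvOrdered (pvFoldB L 5)).getD "" else "audit_only") := by
  have hk := pvFoldB_le L 5
  by_cases h5 : pvFoldB L 5 < 5
  · obtain ⟨s, hs, he⟩ := pvFoldB_lt L 5 h5
    have hr := pvRankF_eval s
    split_ifs at hr with h0 h1 h2 h3 h4
    · subst h0
      have hfv : pvFoldB L 5 = 0 := by rw [← he, hr]
      rw [hfv]
      simp [pvProbe, pvOrdered, hs]
    · subst h1
      have hfv : pvFoldB L 5 = 1 := by rw [← he, hr]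
      rw [hfv]
      have n0 := pvNotMem L "candidate_only_non_governing" (by rw [hfv]; decide)
      simp [pvProbe, pvOrdered, hs, n0]
    · subst h2
      have hfv : pvFoldB L 5 = 2 := by rw [← he, hr]
      rw [hfv]
      have n0 := pvNotMem L "candidate_only_non_governing" (by rw [hfv]; decide)
      have n1 := pvNotMem L "blocked_pending_acquisition" (by rw [hfv]; decide)
      simp [pvProbe, pvOrdered, hs, n0, n1]
    · subst h3
      have hfv : pvFoldB L 5 = 3 := by rw [← he, hr]
      rw [hfv]
      have n0 := pvNotMem L "candidate_only_non_governing" (by rw [hfv]; decide)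
      have n1 := pvNotMem L "blocked_pending_acquisition" (by rw [hfv]; decide)
      have n2 := pvNotMem L "eligible_for_task" (by rw [hfv]; decide)
      simp [pvProbe, pvOrdered, hs, n0, n1, n2]
    · subst h4
      have hfv : pvFoldB L 5 = 4 := by rw [← he, hr]
      rw [hfv]
      have n0 := pvNotMem L "candidate_only_non_governing" (by rw [hfv]; decide)
      have n1 := pvNotMem L "blocked_pending_acquisition" (by rw [hfv]; decide)
      have n2 := pvNotMem L "eligible_for_task" (by rw [hfv]; decide)
      have n3 := pvNotMem L "library_only" (by rw [hfv]; decide)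
      simp [pvProbe, pvOrdered, hs, n0, n1, n2, n3]
    · -- pvRankF s = 5 is impossible below the cap
      rw [hr] at he
      omega
  · have heq : pvFoldB L 5 = 5 := le_antisymm hk (not_lt.mp h5)
    rw [heq]
    have n0 := pvNotMem L "candidate_only_non_governing" (by rw [heq]; decide)
    have n1 := pvNotMem L "blocked_pending_acquisition" (by rw [heq]; decide)
    have n2 := pvNotMem L "eligible_for_task" (by rw [heq]; decide)
    have n3 := pvNotMem L "library_only" (by rw [heq]; decide)
    have n4 := pvNotMem L "audit_only" (by rw [heq]; decide)
    simp [pvProbe, pvOrdered, n0, n1, n2, n3, n4]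

-- ===== VERDICT (by name: the statement is the Claim_ definition above) =====
theorem primary_class_py_spec : Claim_equal_primary_class_py := by
  intro ts _ _
  show primary_class_py ts = primary_class_py_alt ts
  have hfold : ts.foldl
      (fun best kv =>
        if pvRank.getD (pvStatus kv.2) (pvOrdered.length : Int) < best
        then pvRank.getD (pvStatus kv.2) (pvOrdered.length : Int) else best)
      (pvOrdered.length : Int)
      = pvFoldB (ts.map (fun kv => pvStatus kv.2)) 5 := by
    rw [pvFoldB, List.foldl_map]
    rfl
  simp only [primary_class_py, primary_class_py_alt]
  rw [pvMain (ts.map (fun kv => pvStatus kv.2))]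
  simp only [← hfold]
  rfl
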